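-- pv_equiv track=rewrite | github.com/marcelo-lara/ai-light-song-v2 | src/analyzer/stages/patterns.py | _display_bar
-- ===== SOURCE A (Python) =====
-- def _display_bar(beat_labels: list[str | None]) -> str:
--     collapsed: list[str] = []
--     previous = object()
--     for label in beat_labels:
--         display = label if label is not None else "N"
--         if display != previous:
--             collapsed.append(display)
--             previous = display
--     return "-".join(collapsed)
-- ===== SOURCE B (Python) =====
-- def _display_bar(beat_labels):
--     if not beat_labels:
--         return ""
--
--     def keys(xs):
--         if len(xs) == 1:
--             return ["N" if xs[0] is None else xs[0]]
--         mid = len(xs) // 2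
--         left, right = keys(xs[:mid]), keys(xs[mid:])
--         if left[-1] == right[0]:
--             return left + right[1:]
--         return left + right
--
--     return "-".join(keys(beat_labels))
-- ===== Notes on version B (the rewrite author's own statement) =====
-- stated objective: alternative
-- what changed: Replaces A's single left-to-right previous-sentinel scan with a divide-and-conquer: recursively collapse each half to its run keys, then merge at the boundary by dropping the right half's first key when it equals the left half's last.
import Mathlib
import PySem

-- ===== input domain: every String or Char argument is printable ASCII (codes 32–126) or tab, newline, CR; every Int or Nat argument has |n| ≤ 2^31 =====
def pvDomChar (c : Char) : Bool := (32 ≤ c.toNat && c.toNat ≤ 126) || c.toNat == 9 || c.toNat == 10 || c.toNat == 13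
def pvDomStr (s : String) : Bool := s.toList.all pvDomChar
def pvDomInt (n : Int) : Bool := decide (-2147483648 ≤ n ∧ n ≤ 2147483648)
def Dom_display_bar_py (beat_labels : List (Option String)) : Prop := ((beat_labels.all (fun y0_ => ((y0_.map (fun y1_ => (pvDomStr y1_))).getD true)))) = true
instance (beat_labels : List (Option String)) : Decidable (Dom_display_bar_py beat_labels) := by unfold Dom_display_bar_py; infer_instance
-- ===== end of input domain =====

-- B replaces A's single left-to-right previous-sentinel scan by divide and conquer: collapse each half recursively and merge at the boundary, dropping the right half's first key when it matches the left half's last; alternative decomposition, same result.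
-- ===== PORT A =====
def display_bar_py (beat_labels : List (Option String)) : String :=
  let st := beat_labels.foldl (fun (st : List String × Option String) label =>
    let display := match label with | some s => s | none => "N"
    match st.2 with
    | some p => if display != p then (st.1 ++ [display], some display) else st
    | none => (st.1 ++ [display], some display)) ([], none)
  PySem.Str.join "-" st.1

-- ===== PORT B =====
-- keys xs: divide-and-conquer collapsing; only ever called on nonempty lists ([] case is dead)
def pvKeys : List (Option String) → List String
  | [] => []
  | [l] => [match l with | some s => s | none => "N"]
  | x :: y :: t =>
    let xs := x :: y :: t
    let mid := xs.length / 2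
    let left := pvKeys (xs.take mid)
    let right := pvKeys (xs.drop mid)
    match right with
    | [] => left
    | k :: ks => if left.getLast? == some k then left ++ ks else left ++ k :: ks
termination_by l => l.length
decreasing_by
  · simp [List.length_take]; omega
  · simp [List.length_drop]; omega

def display_bar_py_alt (beat_labels : List (Option String)) : String :=
  match beat_labels with
  | [] => ""
  | _ => PySem.Str.join "-" (pvKeys beat_labels)

-- ===== PRECONDITION & SPEC =====
def Spec_display_bar_py (beat_labels : List (Option String)) (out : String) : Prop := out = display_bar_py_alt beat_labels
instance (beat_labels : List (Option String)) (out : String) : Decidable (Spec_display_bar_py beat_labels out) := by unfold Spec_display_bar_py; infer_instance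

-- ===== CLAIM (what is proved, stated in full; the proofs are below) =====
def Claim_equal_display_bar_py : Prop := ∀ (beat_labels : List (Option String)), Dom_display_bar_py beat_labels → Spec_display_bar_py beat_labels (display_bar_py beat_labels)

-- ===== LEMMAS AND PROOFS =====

def pvDisp : Option String → String
  | some s => s
  | none => "N"

def pvStep (st : List String × Option String) (display : String) : List String × Option String :=
  match st.2 with
  | some p => if display != p then (st.1 ++ [display], some display) else st
  | none => (st.1 ++ [display], some display)

-- run-collapse: first element of each maximal run of equal adjacent strings
def pvGroupKeys : List String → List String
  | [] => []
  | x :: xs => x :: pvGroupKeys (xs.dropWhile (· == x))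
termination_by l => l.length
decreasing_by simpa using Nat.lt_succ_of_le (List.length_dropWhile_le _ _)

lemma pvFold_fst (l : List (Option String)) : ∀ (acc : List String) (p : Option String),
    (l.foldl (fun st label => pvStep st (pvDisp label)) (acc, p)).1 = acc ++ (match p with
      | none => pvGroupKeys (l.map pvDisp)
      | some q => pvGroupKeys ((l.map pvDisp).dropWhile (· == q))) := by
  induction l with
  | nil => intro acc p; cases p <;> simp [pvGroupKeys]
  | cons x xs ih =>
    intro acc p
    cases p with
    | none =>
      simp only [List.map_cons, List.foldl_cons, pvGroupKeys]
      rw [show pvStep (acc, none) (pvDisp x) = (acc ++ [pvDisp x], some (pvDisp x)) from rfl, ih]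
      simp
    | some q =>
      by_cases h : pvDisp x = q
      · subst h
        simp only [List.map_cons, List.foldl_cons]
        rw [show pvStep (acc, some (pvDisp x)) (pvDisp x) = (acc, some (pvDisp x)) by
          simp [pvStep], ih]
        simp [List.dropWhile]
      · have hb : (pvDisp x == q) = false := by simp [h]
        simp only [List.map_cons, List.foldl_cons]
        rw [show pvStep (acc, some q) (pvDisp x) = (acc ++ [pvDisp x], some (pvDisp x)) by
          simp [pvStep, bne, hb], ih]
        simp [List.dropWhile, hb, pvGroupKeys]

lemma pvGroupKeys_ne_nil (l : List String) (h : l ≠ []) : pvGroupKeys l ≠ [] := by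
  cases l with
  | nil => exact absurd rfl h
  | cons x xs => simp [pvGroupKeys]

-- merging the collapsed halves at the boundary reproduces the collapse of the concatenation
lemma pvGK_append (B : List String) (hB : B ≠ []) : ∀ (A : List String), A ≠ [] →
    pvGroupKeys (A ++ B) =
      match pvGroupKeys B with
      | [] => pvGroupKeys A
      | k :: ks => if (pvGroupKeys A).getLast? == some k then pvGroupKeys A ++ ks
                   else pvGroupKeys A ++ k :: ks := by
  intro A
  induction A using pvGroupKeys.induct with
  | case1 => intro h; exact absurd rfl h
  | case2 x xs ih =>
    intro _
    obtain ⟨y, ys, rfl⟩ := List.exists_cons_of_ne_nil hB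
    by_cases hd : xs.dropWhile (· == x) = []
    · have hxs : ∀ a ∈ xs, a = x := by
        intro a ha
        have := List.dropWhile_eq_nil_iff.mp hd a ha
        simpa using this
      have hdrop : (xs ++ y :: ys).dropWhile (· == x)
          = (y :: ys).dropWhile (· == x) := by
        rw [List.dropWhile_append]; simp [hd]
      simp only [List.cons_append, pvGroupKeys, hdrop, hd]
      by_cases hxy : y = x
      · subst hxy
        simp [List.dropWhile]
      · have hb : ((y == x) = false) := by simp [hxy]
        simp [pvGroupKeys, List.dropWhile, hb, Ne.symm hxy]
    · have ihd := ih hd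
      have hdrop : (xs ++ y :: ys).dropWhile (· == x)
          = xs.dropWhile (· == x) ++ y :: ys := by
        rw [List.dropWhile_append]; simp [hd]
      have hgk : pvGroupKeys (xs.dropWhile (· == x)) ≠ [] := pvGroupKeys_ne_nil _ hd
      have hlast : (x :: pvGroupKeys (xs.dropWhile (· == x))).getLast?
          = (pvGroupKeys (xs.dropWhile (· == x))).getLast? := by
        obtain ⟨z, zs, hz⟩ := List.exists_cons_of_ne_nil hgk
        rw [hz, List.getLast?_cons_cons]
      simp only [List.cons_append, pvGroupKeys, hdrop, ihd, hlast]
      rw [apply_ite (List.cons x)]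

lemma pvKeys_eq_aux : ∀ (n : Nat) (xs : List (Option String)), xs.length ≤ n → xs ≠ [] →
    pvKeys xs = pvGroupKeys (xs.map pvDisp) := by
  intro n
  induction n with
  | zero => intro xs hn h; cases xs with
    | nil => exact absurd rfl h
    | cons a b => simp at hn
  | succ n ih =>
    intro xs hn hne
    match xs with
    | [] => exact absurd rfl hne
    | [l] => cases l <;> simp [pvKeys, pvGroupKeys, pvDisp]
    | x :: y :: t =>
    rw [pvKeys.eq_def]
    simp only
    have hlen : (x :: y :: t).length / 2 ≥ 1 ∧ (x :: y :: t).length / 2 < (x :: y :: t).length := by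
      simp; omega
    have htake : (x :: y :: t).take ((x :: y :: t).length / 2) ≠ [] := by
      simp [List.take_eq_nil_iff]
    have hdropne : (x :: y :: t).drop ((x :: y :: t).length / 2) ≠ [] := by
      simp [List.drop_eq_nil_iff]; omega
    rw [ih _ (by simp [List.length_take] at *; omega) htake,
        ih _ (by simp [List.length_drop] at *; omega) hdropne]
    have hsplit : ((x :: y :: t).take ((x :: y :: t).length / 2)).map pvDisp
        ++ ((x :: y :: t).drop ((x :: y :: t).length / 2)).map pvDisp
        = (x :: y :: t).map pvDisp := by
      rw [← List.map_append, List.take_append_drop]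
    have hBne : ((x :: y :: t).drop ((x :: y :: t).length / 2)).map pvDisp ≠ [] := by
      simpa using hdropne
    have hAne : ((x :: y :: t).take ((x :: y :: t).length / 2)).map pvDisp ≠ [] := by
      simpa using htake
    rw [← hsplit, pvGK_append _ hBne _ hAne]

lemma pvKeys_eq (xs : List (Option String)) (h : xs ≠ []) :
    pvKeys xs = pvGroupKeys (xs.map pvDisp) :=
  pvKeys_eq_aux xs.length xs le_rfl h

-- ===== VERDICT (by name: the statement is the Claim_ definition above) =====
theorem display_bar_py_spec : Claim_equal_display_bar_py := by
  intro beat_labels _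
  unfold Spec_display_bar_py display_bar_py display_bar_py_alt
  cases beat_labels with
  | nil => decide
  | cons x xs =>
    show PySem.Str.join "-" (((x :: xs).foldl (fun st label =>
        pvStep st (pvDisp label)) ([], none)).1) =
      PySem.Str.join "-" (pvKeys (x :: xs))
    rw [pvFold_fst, pvKeys_eq _ (by simp)]
    simp
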